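-- pv_equiv track=rewrite | github.com/onelaravel/onelaravel | scripts/build.py | convert_view_name_to_function_name
-- ===== SOURCE A (Python) =====
-- def convert_view_name_to_function_name(view_name):
--     """
--     Convert view name to function name
--     Example: web.home -> WebHome, admin.dashboard -> AdminDashboard, web.user-detail -> WebUserDetail, web.layouts-base_a1 -> WebLayoutsBaseA1
--     """
--     # Split by dot and process each part
--     parts = view_name.split('.')
--     function_parts = []
--
--     for part in parts:
--         # Remove both - and _ and capitalize after each removal
--         # First split by - and _, then capitalize each segment
--         segments = []
--         for separator in ['-', '_']:
--             if separator in part: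
--                 part = part.replace(separator, ' ')
--
--         # Split by space and capitalize each word
--         words = part.split()
--         for word in words:
--             if word:
--                 segments.append(word.capitalize())
--
--         if segments:
--             function_parts.append(''.join(segments))
--
--     return ''.join(function_parts)
-- ===== SOURCE B (Python) =====
-- def convert_view_name_to_function_name(view_name):
--     """
--     Convert view name to function name in a single character pass:
--     separators ('.', '-', '_', whitespace) end the current word; every other
--     character is emitted uppercased at a word start and lowercased otherwise.
--     """
--     out = []
--     new_word = True
--     for ch in view_name:
--         if ch in '.-_' or ch.isspace():
--             new_word = True
--         else:
--             out.append(ch.upper() if new_word else ch.lower())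
--             new_word = False
--     return ''.join(out)
-- ===== Notes on version B (the rewrite author's own statement) =====
-- stated objective: simpler
-- what changed: Replaces the split-by-dot / conditional replace / whitespace re-split / capitalize-join pipeline (which builds several intermediate lists per part) with a single character-by-character pass keeping one boolean word-start flag and emitting each kept character already cased.
import Mathlib
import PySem

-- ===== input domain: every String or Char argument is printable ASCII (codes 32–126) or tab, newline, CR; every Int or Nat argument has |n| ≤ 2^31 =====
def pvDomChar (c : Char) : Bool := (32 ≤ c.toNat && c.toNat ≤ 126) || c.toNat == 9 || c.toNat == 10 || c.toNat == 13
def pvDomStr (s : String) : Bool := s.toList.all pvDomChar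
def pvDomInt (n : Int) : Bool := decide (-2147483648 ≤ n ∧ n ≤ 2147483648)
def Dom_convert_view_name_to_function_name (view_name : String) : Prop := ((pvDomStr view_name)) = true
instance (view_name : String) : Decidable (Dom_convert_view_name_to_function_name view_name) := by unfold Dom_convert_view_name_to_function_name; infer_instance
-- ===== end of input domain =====

-- B replaces A's split-by-dot / conditional-replace / whitespace-split / capitalize-join pipeline by a single character pass with a boolean word-start flag; equal return value (proved below).
-- ===== PORT A =====
-- Python str.capitalize(), exact on ASCII
def pyCapitalize (w : String) : String :=
  match w.toList with
  | [] => String.ofList []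
  | c :: t => String.ofList (PySem.Chars.upperChar c :: t.map PySem.Chars.lowerChar)

-- body of A's `for part in parts` loop
def aPartStep (fp : List String) (part : String) : List String :=
  let part := ["-", "_"].foldl (fun p sepr =>
    if PySem.Str.isIn sepr p then PySem.Str.replace p sepr " " else p) part
  let words := PySem.Str.split₀ part
  let segments := words.foldl (fun (seg : List String) word =>
    if word ≠ "" then seg ++ [pyCapitalize word] else seg) []
  if segments ≠ [] then fp ++ [PySem.Str.join "" segments] else fp

def convert_view_name_to_function_name (view_name : String) : String :=
  let parts : List String := (PySem.Chars.splitOn view_name.toList ['.']).map String.ofList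
  let function_parts := parts.foldl aPartStep []
  PySem.Str.join "" function_parts

-- ===== PORT B =====
def convert_view_name_to_function_name_alt (view_name : String) : String :=
  String.ofList ((view_name.toList.foldl (fun (st : Bool × List Char) ch =>
    if ch = '.' ∨ ch = '-' ∨ ch = '_' ∨ PySem.Chars.isspace ch = true then (true, st.2)
    else (false, st.2 ++ [if st.1 then PySem.Chars.upperChar ch else PySem.Chars.lowerChar ch]))
    (true, ([] : List Char))).2)

-- ===== PRECONDITION & SPEC =====
def Spec_convert_view_name_to_function_name (view_name : String) (out : String) : Prop := out = convert_view_name_to_function_name_alt view_name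
instance (view_name : String) (out : String) : Decidable (Spec_convert_view_name_to_function_name view_name out) := by unfold Spec_convert_view_name_to_function_name; infer_instance

-- ===== CLAIM (what is proved, stated in full; the proofs are below) =====
def Claim_equal_convert_view_name_to_function_name : Prop := ∀ (view_name : String), Dom_convert_view_name_to_function_name view_name → Spec_convert_view_name_to_function_name view_name (convert_view_name_to_function_name view_name)

-- ===== LEMMAS AND PROOFS =====
def sepChar (c : Char) : Bool := c == '.' || c == '-' || c == '_' || PySem.Chars.isspace c

def subChar (c : Char) : Char := if c = '-' ∨ c = '_' then ' ' else c

def tokCap : List Char → Bool → List Char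
  | [], _ => []
  | c :: rest, b =>
    if sepChar c then tokCap rest true
    else (if b then PySem.Chars.upperChar c else PySem.Chars.lowerChar c) :: tokCap rest false

-- replace.go with single-char old
theorem replace_go_single (a b : Char) (l : List Char) :
    ∀ fuel, l.length ≤ fuel → ∀ acc,
      PySem.Chars.replace.go [a] [b] fuel l acc
        = acc.reverse ++ l.map (fun c => if c = a then b else c) := by
  induction l with
  | nil => intro fuel _ acc; cases fuel <;> simp [PySem.Chars.replace.go]
  | cons c t ih =>
    intro fuel hf acc
    cases fuel with
    | zero => simp at hf
    | succ f =>
      rw [PySem.Chars.replace.go]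
      by_cases h : c = a
      · subst h
        simp [List.isPrefixOf, ih f (by simpa using hf)]
      · have : List.isPrefixOf [a] (c :: t) = false := by
          simp [List.isPrefixOf]; exact fun e => h e.symm
        simp [this, h, ih f (by simpa using hf)]

theorem replace_single (a b : Char) (l : List Char) :
    PySem.Chars.replace l [a] [b] = l.map (fun c => if c = a then b else c) := by
  simpa using replace_go_single a b l l.length le_rfl []

def mySplit : List Char → List (List Char)
  | [] => [[]]
  | c :: rest =>
    if c = '.' then [] :: mySplit rest
    else (c :: (mySplit rest).headI) :: (mySplit rest).tail

theorem mySplit_ne_nil (l : List Char) : mySplit l ≠ [] := by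
  cases l with
  | nil => simp [mySplit]
  | cons c rest => by_cases h : c = '.' <;> simp [mySplit, h]


theorem modifyHead_id' {α : Type} (l : List α) : List.modifyHead (fun x => x) l = l := by
  cases l <;> simp

theorem splitOn_go_dot (l : List Char) :
    ∀ fuel, l.length ≤ fuel → ∀ cur acc,
      PySem.Chars.splitOn.go ['.'] fuel l cur acc
        = acc.reverse ++ (mySplit l).modifyHead (cur.reverse ++ ·) := by
  induction l with
  | nil => intro fuel _ cur acc; cases fuel <;> simp [PySem.Chars.splitOn.go, mySplit]
  | cons c t ih =>
    intro fuel hf cur acc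
    cases fuel with
    | zero => simp at hf
    | succ f =>
      rw [PySem.Chars.splitOn.go]
      by_cases h : c = '.'
      · subst h
        simp [List.isPrefixOf, ih f (by simpa using hf), mySplit, modifyHead_id']
      · have hp : List.isPrefixOf ['.'] (c :: t) = false := by
          simp [List.isPrefixOf]; exact fun e => h e.symm
        obtain ⟨h0, t0, he⟩ : ∃ h0 t0, mySplit t = h0 :: t0 := by
          cases hm : mySplit t with
          | nil => exact absurd hm (mySplit_ne_nil t)
          | cons a b => exact ⟨a, b, rfl⟩
        simp [hp, ih f (by simpa using hf), mySplit, h, he]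

theorem splitOn_dot (l : List Char) : PySem.Chars.splitOn l ['.'] = mySplit l := by
  have := splitOn_go_dot l (l.length + 1) (by omega) [] []
  simpa [PySem.Chars.splitOn, modifyHead_id'] using this

def wordsAux : List Char → List Char → List (List Char)
  | cur, [] => if cur = [] then [] else [cur]
  | cur, c :: rest =>
    if PySem.Chars.isspace c then
      (if cur = [] then wordsAux [] rest else cur :: wordsAux [] rest)
    else wordsAux (cur ++ [c]) rest

theorem split₀_go (l : List Char) :
    ∀ cur acc, PySem.Chars.split₀.go l cur acc = acc.reverse ++ wordsAux cur.reverse l := by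
  induction l with
  | nil =>
    intro cur acc
    by_cases h : cur = [] <;> simp [PySem.Chars.split₀.go, wordsAux, h, List.isEmpty_iff]
  | cons c t ih =>
    intro cur acc
    rw [PySem.Chars.split₀.go]
    by_cases hs : PySem.Chars.isspace c
    · by_cases h : cur = [] <;>
        simp [hs, h, List.isEmpty_iff, ih, wordsAux]
    · simp [hs, ih, wordsAux]

theorem split₀_eq (l : List Char) : PySem.Chars.split₀ l = wordsAux [] l := by
  simpa using split₀_go l [] []

def capW : List Char → List Char
  | [] => []
  | c :: t => PySem.Chars.upperChar c :: t.map PySem.Chars.lowerChar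

theorem capW_append_one (cur : List Char) (c : Char) :
    capW (cur ++ [c]) = capW cur ++ (if cur = [] then [PySem.Chars.upperChar c] else [PySem.Chars.lowerChar c]) := by
  cases cur <;> simp [capW]

-- words emitted by wordsAux are nonempty
theorem wordsAux_ne_nil (l : List Char) : ∀ cur, ∀ w ∈ wordsAux cur l, w ≠ [] := by
  induction l with
  | nil => intro cur w hw; by_cases h : cur = [] <;> simp [wordsAux, h] at hw <;> simp_all
  | cons c t ih =>
    intro cur w hw
    by_cases hs : PySem.Chars.isspace c
    · by_cases h : cur = [] <;> simp [wordsAux, hs, h] at hw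
      · exact ih [] w hw
      · rcases hw with h' | h'
        · subst h'; exact h
        · exact ih [] w h'
    · simp [wordsAux, hs] at hw; exact ih _ w hw

-- main inner lemma
theorem words_capW (l : List Char) (hl : ∀ c ∈ l, c ≠ '.' ∧ c ≠ '-' ∧ c ≠ '_') :
    ∀ cur, (List.map capW (wordsAux cur l)).flatten = capW cur ++ tokCap l (cur = []) := by
  induction l with
  | nil => intro cur; by_cases h : cur = [] <;> simp [wordsAux, tokCap, h, capW]
  | cons c t ih =>
    intro cur
    have hc := hl c (by simp)
    have ht : ∀ c ∈ t, c ≠ '.' ∧ c ≠ '-' ∧ c ≠ '_' := fun x hx => hl x (by simp [hx])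
    by_cases hs : PySem.Chars.isspace c
    · have hsep : sepChar c = true := by simp [sepChar, hs]
      by_cases h : cur = [] <;>
        simp [wordsAux, hs, h, tokCap, hsep, ih ht [], capW]
    · have hsep : sepChar c = false := by
        simp [sepChar, hs, hc.1, hc.2.1, hc.2.2]
      rw [wordsAux, if_neg (by simpa using hs), ih ht (cur ++ [c]), capW_append_one]
      by_cases h : cur = [] <;> simp [h, tokCap, hsep, capW]

theorem tokCap_map_sub (l : List Char) : ∀ b, tokCap (l.map subChar) b = tokCap l b := by
  induction l with
  | nil => intro b; simp
  | cons c t ih =>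
    intro b
    by_cases h : c = '-' ∨ c = '_'
    · have h1 : subChar c = ' ' := by simp [subChar, h]
      have h2 : sepChar c = true := by rcases h with h | h <;> simp [sepChar, h]
      have hsp : sepChar ' ' = true := by decide
      simp [tokCap, h1, h2, hsp, ih]
    · have h1 : subChar c = c := by simp [subChar, h]
      simp [tokCap, h1, ih]

theorem mem_mySplit_no_dot (l : List Char) : ∀ p ∈ mySplit l, '.' ∉ p := by
  induction l with
  | nil => simp [mySplit]
  | cons c t ih =>
    intro p hp
    by_cases h : c = '.'
    · simp [mySplit, h] at hp
      rcases hp with h' | h'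
      · simp [h']
      · exact ih p h'
    · obtain ⟨h0, t0, he⟩ : ∃ h0 t0, mySplit t = h0 :: t0 := by
        cases hm : mySplit t with
        | nil => exact absurd hm (mySplit_ne_nil t)
        | cons a b => exact ⟨a, b, rfl⟩
      simp [mySplit, h, he] at hp
      rcases hp with h' | h'
      · subst h'
        have := ih h0 (by simp [he])
        simp [this]; exact fun e => h e.symm
      · exact ih p (by simp [he, h'])

theorem mySplit_tokCap (l : List Char) :
    ∀ b, tokCap (mySplit l).headI b
        ++ (List.map (fun p => tokCap p true) (mySplit l).tail).flatten = tokCap l b := by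
  induction l with
  | nil => intro b; simp [mySplit, tokCap]
  | cons c t ih =>
    intro b
    obtain ⟨h0, t0, he⟩ : ∃ h0 t0, mySplit t = h0 :: t0 := by
      cases hm : mySplit t with
      | nil => exact absurd hm (mySplit_ne_nil t)
      | cons a b => exact ⟨a, b, rfl⟩
    have iht : ∀ b, tokCap h0 b ++ (List.map (fun p => tokCap p true) t0).flatten = tokCap t b := by
      intro b; have := ih b; rwa [he] at this
    by_cases h : c = '.'
    · subst h
      have hdot : sepChar '.' = true := by decide
      simp [mySplit, he, tokCap, hdot, iht true]
    · by_cases hsep : sepChar c = true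
      · simp [mySplit, h, he, tokCap, hsep, iht true]
      · simp [mySplit, h, he, tokCap, hsep, ← iht false]

-- B's loop computes tokCap
theorem alt_fold (l : List Char) :
    ∀ b acc, (l.foldl (fun (st : Bool × List Char) ch =>
      if ch = '.' ∨ ch = '-' ∨ ch = '_' ∨ PySem.Chars.isspace ch = true then (true, st.2)
      else (false, st.2 ++ [if st.1 then PySem.Chars.upperChar ch else PySem.Chars.lowerChar ch]))
      (b, acc)).2 = acc ++ tokCap l b := by
  induction l with
  | nil => intro b acc; simp [tokCap]
  | cons c t ih =>
    intro b acc
    by_cases h : c = '.' ∨ c = '-' ∨ c = '_' ∨ PySem.Chars.isspace c = true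
    · have hsep : sepChar c = true := by
        rcases h with h | h | h | h <;> simp [sepChar, h]
      simp [List.foldl_cons, if_pos h, ih, tokCap, hsep]
    · have hsep : sepChar c = false := by
        simp only [not_or] at h
        simp [sepChar, h.1, h.2.1, h.2.2.1, h.2.2.2]
      cases b <;>
        simp [List.foldl_cons, if_neg h, ih, tokCap, hsep]

theorem alt_toList (s : String) :
    convert_view_name_to_function_name_alt s = String.ofList (tokCap s.toList true) := by
  rw [convert_view_name_to_function_name_alt, alt_fold]
  simp

-- the two replaces compose to subChar
theorem replace_step (p : String) :
    ((["-", "_"].foldl (fun p sepr =>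
      if PySem.Str.isIn sepr p then PySem.Str.replace p sepr " " else p) p)).toList
      = p.toList.map subChar := by
  have key : ∀ (a : Char) (q : String),
      (if PySem.Str.isIn (String.ofList [a]) q then PySem.Str.replace q (String.ofList [a]) " " else q).toList
        = q.toList.map (fun c => if c = a then ' ' else c) := by
    intro a q
    by_cases h : PySem.Str.isIn (String.ofList [a]) q = true
    · simp only [PySem.Str.isIn] at h
      simp only [show (String.ofList [a]).toList = [a] from by simp] at h
      simp [h, PySem.Str.toList_replace, replace_single]
    · simp only [PySem.Str.isIn] at h
      simp only [show (String.ofList [a]).toList = [a] from by simp] at h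
      have h2 : ¬ [a] <:+: q.toList := by
        rw [← PySem.Chars.isIn_eq_false_iff]
        simpa using h
      have h3 : a ∉ q.toList := fun hm => h2 ((List.singleton_infix_iff a q.toList).mpr hm)
      have hmap : List.map (fun c => if c = a then ' ' else c) q.toList = q.toList := by
        conv_rhs => rw [← List.map_id q.toList]
        exact List.map_congr_left (fun c hc => by
          have hne : c ≠ a := fun e => h3 (e ▸ hc)
          simp [hne])
      simp [h, hmap]
  have k1 := key '-' p
  have k2 := key '_' (if PySem.Str.isIn (String.ofList ['-']) p then PySem.Str.replace p (String.ofList ['-']) " " else p)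
  simp only [List.foldl_cons, List.foldl_nil]
  have e1 : (String.ofList ['-'] : String) = "-" := by decide
  have e2 : (String.ofList ['_'] : String) = "_" := by decide
  rw [e1] at k1 k2; rw [e2] at k2
  rw [k2, k1, List.map_map]
  apply List.map_congr_left
  intro c _
  by_cases h1 : c = '-' <;> by_cases h2 : c = '_' <;> simp [subChar, h1, h2] <;> simp_all

theorem join_empty_flatten (parts : List (List Char)) :
    PySem.Chars.join [] parts = parts.flatten := by
  induction parts with
  | nil => simp [PySem.Chars.join_nil]
  | cons p rest ih =>
    cases rest with
    | nil => simp [PySem.Chars.join_singleton]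
    | cons q r => simp [PySem.Chars.join_cons_cons, ih]

theorem capit_toList (w : List Char) :
    (pyCapitalize (String.ofList w)).toList = capW w := by
  cases w <;> simp [pyCapitalize, capW]

theorem seg_fold (ws : List String) (hw : ∀ w ∈ ws, w ≠ "") :
    ∀ acc, ws.foldl (fun (seg : List String) word =>
      if word ≠ "" then seg ++ [pyCapitalize word] else seg) acc
      = acc ++ ws.map pyCapitalize := by
  induction ws with
  | nil => intro acc; simp
  | cons w rest ih =>
    intro acc
    have h := hw w (by simp)
    simp only [List.foldl_cons, if_pos h]
    rw [ih (fun x hx => hw x (by simp [hx]))]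
    simp

theorem ofList_ne_empty (l : List Char) (h : l ≠ []) : String.ofList l ≠ "" := by
  intro e
  apply h
  have := congrArg String.toList e
  simpa using this

theorem mySplit_flatten (l : List Char) :
    (List.map (fun p => tokCap p true) (mySplit l)).flatten = tokCap l true := by
  obtain ⟨h0, t0, he⟩ : ∃ h0 t0, mySplit l = h0 :: t0 := by
    cases hm : mySplit l with
    | nil => exact absurd hm (mySplit_ne_nil l)
    | cons a b => exact ⟨a, b, rfl⟩
  have := mySplit_tokCap l true
  rw [he] at this ⊢
  simpa using this

def aSeg (part : String) : List String :=
  (PySem.Str.split₀ (["-", "_"].foldl (fun p sepr =>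
    if PySem.Str.isIn sepr p then PySem.Str.replace p sepr " " else p) part)).foldl
    (fun (seg : List String) word => if word ≠ "" then seg ++ [pyCapitalize word] else seg) []

theorem aPartStep_eq (fp : List String) (part : String) :
    aPartStep fp part = if aSeg part ≠ [] then fp ++ [PySem.Str.join "" (aSeg part)] else fp := rfl

theorem aSeg_eq (part : String) :
    aSeg part = (wordsAux [] (part.toList.map subChar)).map (fun w => pyCapitalize (String.ofList w)) := by
  rw [aSeg]
  have hq := replace_step part
  rw [PySem.Str.split₀, hq, split₀_eq]
  rw [seg_fold]
  · simp
  · intro w hw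
    obtain ⟨l0, hl0, rfl⟩ := List.mem_map.mp hw
    exact ofList_ne_empty l0 (wordsAux_ne_nil _ [] l0 hl0)

theorem aSeg_toList (part : String) (hd : '.' ∉ part.toList) :
    (List.map String.toList (aSeg part)).flatten = tokCap part.toList true := by
  rw [aSeg_eq, List.map_map]
  have hcap : (String.toList ∘ fun w => pyCapitalize (String.ofList w)) = capW := by
    funext w; simpa using capit_toList w
  rw [hcap]
  have hchars : ∀ c ∈ part.toList.map subChar, c ≠ '.' ∧ c ≠ '-' ∧ c ≠ '_' := by
    intro c hc
    obtain ⟨x, hx, rfl⟩ := List.mem_map.mp hc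
    by_cases h : x = '-' ∨ x = '_'
    · rw [show subChar x = ' ' from by simp [subChar, h]]
      refine ⟨by decide, by decide, by decide⟩
    · have : subChar x = x := by simp [subChar, h]
      rw [this]
      simp only [not_or] at h
      exact ⟨fun e => hd (e ▸ hx), h.1, h.2⟩
  have := words_capW (part.toList.map subChar) hchars []
  simp only [capW, List.nil_append] at this
  rw [this]
  simp [tokCap_map_sub]

theorem strJoin_toList (segs : List String) :
    (PySem.Str.join "" segs).toList = (List.map String.toList segs).flatten := by
  rw [PySem.Str.join]
  have : ("" : String).toList = [] := rfl
  simp [this, join_empty_flatten]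

theorem outer_fold (parts : List String) (hp : ∀ p ∈ parts, '.' ∉ p.toList) :
    ∀ fp, (List.map String.toList (parts.foldl aPartStep fp)).flatten
      = (List.map String.toList fp).flatten
        ++ (parts.map (fun p => tokCap p.toList true)).flatten := by
  induction parts with
  | nil => intro fp; simp
  | cons part rest ih =>
    intro fp
    have hdr : '.' ∉ part.toList := hp part (by simp)
    have hrest : ∀ p ∈ rest, '.' ∉ p.toList := fun p h => hp p (by simp [h])
    rw [List.foldl_cons, aPartStep_eq]
    by_cases h : aSeg part = []
    · have hz : tokCap part.toList true = [] := by
        rw [← aSeg_toList part hdr, h]; rfl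
      simp [h, ih hrest, hz]
    · simp only [h, ne_eq, not_false_iff, if_pos, ih hrest]
      simp
      rw [join_empty_flatten]
      exact aSeg_toList part hdr

theorem A_eq (s : String) :
    convert_view_name_to_function_name s = String.ofList (tokCap s.toList true) := by
  rw [convert_view_name_to_function_name]
  have hparts : ∀ p ∈ (PySem.Chars.splitOn s.toList ['.']).map String.ofList, '.' ∉ p.toList := by
    intro p hp
    rw [splitOn_dot] at hp
    obtain ⟨l0, hl0, rfl⟩ := List.mem_map.mp hp
    simpa using mem_mySplit_no_dot s.toList l0 hl0
  have h1 := outer_fold _ hparts []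
  have h2 : (PySem.Str.join "" ((PySem.Chars.splitOn s.toList ['.']).map String.ofList |>.foldl aPartStep [])).toList
      = tokCap s.toList true := by
    rw [strJoin_toList, h1, splitOn_dot]
    simp [List.map_map, Function.comp]
    have hmm : List.map ((fun p => tokCap p.toList true) ∘ String.ofList) (mySplit s.toList)
        = List.map (fun p => tokCap p true) (mySplit s.toList) :=
      List.map_congr_left (fun p _ => by simp)
    rw [hmm]
    exact mySplit_flatten s.toList
  have := congrArg String.ofList h2
  simpa using this

theorem final_eq (s : String) :
    convert_view_name_to_function_name s = convert_view_name_to_function_name_alt s := by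
  rw [A_eq, alt_toList]

-- ===== VERDICT (by name: the statement is the Claim_ definition above) =====
theorem convert_view_name_to_function_name_spec : Claim_equal_convert_view_name_to_function_name := by
  intro s _
  unfold Spec_convert_view_name_to_function_name
  exact final_eq s
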